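-- pv_equiv track=rewrite | github.com/kyoto-kaira/Mathematical_Optimization_2022 | src/貪欲法(最大カット問題).py | donyokuhou
-- ===== SOURCE A (Python) =====
-- def get_cutsum(i, ls, c):
--     k = 0
--     cutsum = 0
--     while k<len(ls):
--         cutsum += c[i][ls[k]]
--         k += 1
--     return cutsum
--
-- def donyokuhou(v, c):
--     S_list = []
--     T_list = []
--     i = 0
--     S_cutgain = 0
--     T_cutgain = 0
--
--     while i < len(v):
--         S_cutgain = get_cutsum(i, T_list, c)
--         T_cutgain = get_cutsum(i, S_list, c)
--         if S_cutgain >= T_cutgain: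
--             v[i] = 1
--             S_list.append(i)
--         else:
--             v[i] = 0
--             T_list.append(i)
--         i += 1
--
--     return v
-- ===== SOURCE B (Python) =====
-- def donyokuhou(v, c):
--     # Scatter/forward-propagation: keep a difference array d where d[i] accumulates
--     # (S_cutgain - T_cutgain) for the not-yet-assigned vertex i; deciding vertex i is
--     # then a sign test, and its contribution is pushed forward to all later vertices.
--     # Mutates v in place like the original.
--     n = len(v)
--     d = [0] * n
--     for i in range(n):
--         v[i] = 1 if d[i] >= 0 else 0
--         w = -1 if v[i] == 1 else 1
--         for k in range(i + 1, n):
--             d[k] += w * c[k][i]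
--     return v
-- ===== Notes on version B (the rewrite author's own statement) =====
-- stated objective: alternative
-- what changed: Replaces the gather-style greedy (per vertex, re-sum edges to the two side lists) by a scatter/forward-propagation scheme: a difference array d holds S_cutgain - T_cutgain for every not-yet-assigned vertex, each decision is a single sign test d[i] >= 0, and the decided vertex pushes +/-c[k][i] forward to all later vertices.
import Mathlib
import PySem

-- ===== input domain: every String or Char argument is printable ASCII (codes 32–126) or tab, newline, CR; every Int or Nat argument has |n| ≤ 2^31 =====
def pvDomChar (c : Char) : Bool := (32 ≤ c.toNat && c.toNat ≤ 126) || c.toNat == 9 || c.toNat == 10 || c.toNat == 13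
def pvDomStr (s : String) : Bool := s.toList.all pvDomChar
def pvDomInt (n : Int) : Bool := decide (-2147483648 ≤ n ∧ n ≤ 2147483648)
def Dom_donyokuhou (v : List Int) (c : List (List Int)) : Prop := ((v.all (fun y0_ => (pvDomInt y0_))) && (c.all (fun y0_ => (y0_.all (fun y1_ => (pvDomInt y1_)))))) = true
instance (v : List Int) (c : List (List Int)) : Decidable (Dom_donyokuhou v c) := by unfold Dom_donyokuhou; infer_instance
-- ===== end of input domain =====

-- B replaces the gather-style greedy (re-summing edges to the two side lists for each vertex)
-- by a scatter/forward-propagation scheme over a difference array: each decision is a sign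
-- test, and the decided vertex pushes its edge weights forward to all later vertices.
-- Both A and B mutate v in place in Python; the equivalence proved here is about the return value.

-- ===== PORT A =====
def getCutsum (i : Int) (ls : List Int) (c : List (List Int)) : Int :=
  ls.foldl (fun cutsum j => cutsum + PySem.List.pyGetD (PySem.List.pyGetD c i []) j 0) 0

def donyokuhou (v : List Int) (c : List (List Int)) : List Int :=
  ((List.range v.length).foldl
    (fun (st : List Int × List Int × List Int) i =>
      let S_cutgain := getCutsum (Int.ofNat i) st.2.2 c
      let T_cutgain := getCutsum (Int.ofNat i) st.2.1 c
      if S_cutgain ≥ T_cutgain then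
        (PySem.List.pySetD st.1 (Int.ofNat i) 1, st.2.1 ++ [Int.ofNat i], st.2.2)
      else
        (PySem.List.pySetD st.1 (Int.ofNat i) 0, st.2.1, st.2.2 ++ [Int.ofNat i]))
    (v, ([] : List Int), ([] : List Int))).1

-- ===== PORT B =====
def donyokuhou_alt (v : List Int) (c : List (List Int)) : List Int :=
  let n := v.length
  ((List.range n).foldl
    (fun (st : List Int × List Int) i =>
      let vi : Int := if PySem.List.pyGetD st.2 (Int.ofNat i) 0 ≥ 0 then 1 else 0
      let v' := PySem.List.pySetD st.1 (Int.ofNat i) vi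
      let w : Int := if vi == 1 then -1 else 1
      let d' := (List.range' (i + 1) (n - (i + 1))).foldl
        (fun d k => PySem.List.pySetD d (Int.ofNat k)
          (PySem.List.pyGetD d (Int.ofNat k) 0
            + w * PySem.List.pyGetD (PySem.List.pyGetD c (Int.ofNat k) []) (Int.ofNat i) 0))
        st.2
      (v', d'))
    (v, List.replicate n 0)).1

-- ===== PRECONDITION & SPEC =====
-- Pre_ excludes exactly the inputs where the Python A raises IndexError: at step i ≥ 1
-- A reads c[i][j] for every j < i, so row i must exist and have length ≥ i.
def Pre_donyokuhou (v : List Int) (c : List (List Int)) : Prop :=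
  ∀ i : Nat, i < v.length → i ≠ 0 → i < c.length ∧ i ≤ (c.getD i []).length
instance (v : List Int) (c : List (List Int)) : Decidable (Pre_donyokuhou v c) := by
  unfold Pre_donyokuhou; infer_instance

def pvWitness_donyokuhou : List Int × List (List Int) :=
  ([7, 3], [[0, 2], [5, 0]])

def Spec_donyokuhou (v : List Int) (c : List (List Int)) (out : List Int) : Prop := out = donyokuhou_alt v c
instance (v : List Int) (c : List (List Int)) (out : List Int) : Decidable (Spec_donyokuhou v c out) := by unfold Spec_donyokuhou; infer_instance

-- ===== CLAIM (what is proved, stated in full; the proofs are below) =====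
def Claim_equal_donyokuhou : Prop := ∀ (v : List Int) (c : List (List Int)), Dom_donyokuhou v c → Pre_donyokuhou v c → Spec_donyokuhou v c (donyokuhou v c)

-- ===== LEMMAS AND PROOFS =====

-- A reference "gather" fold: decide vertex k from the already-decided prefix of w.
def fB (c : List (List Int)) (w : List Int) (i : Nat) : List Int :=
  let g := (List.range i).foldl
    (fun (g : Int × Int) j =>
      if PySem.List.pyGetD w (Int.ofNat j) 0 == 1 then
        (g.1, g.2 + PySem.List.pyGetD (PySem.List.pyGetD c (Int.ofNat i) []) (Int.ofNat j) 0)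
      else
        (g.1 + PySem.List.pyGetD (PySem.List.pyGetD c (Int.ofNat i) []) (Int.ofNat j) 0, g.2))
    ((0 : Int), (0 : Int))
  PySem.List.pySetD w (Int.ofNat i) (if g.1 ≥ g.2 then 1 else 0)

def sumF (c : List (List Int)) (w : List Int) (k : Nat) : Int :=
  (((List.range k).filter fun j => !(w.getD j 0 == 1)).map fun j => (c.getD k []).getD j 0).sum
def sumT (c : List (List Int)) (w : List Int) (k : Nat) : Int :=
  (((List.range k).filter fun j => w.getD j 0 == 1).map fun j => (c.getD k []).getD j 0).sum

theorem innerFold (w row : List Int) (l : List Nat) (a b : Int) :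
    l.foldl (fun (g : Int × Int) j =>
        if w.getD j 0 == 1 then (g.1, g.2 + row.getD j 0)
        else (g.1 + row.getD j 0, g.2)) (a, b)
      = (a + ((l.filter fun j => !(w.getD j 0 == 1)).map fun j => row.getD j 0).sum,
         b + ((l.filter fun j => w.getD j 0 == 1).map fun j => row.getD j 0).sum) := by
  induction l generalizing a b with
  | nil => simp
  | cons j t ih =>
    simp only [List.foldl_cons, List.filter_cons]
    by_cases h : w.getD j 0 = 1
    · have hb : (w.getD j 0 == 1) = true := beq_iff_eq.mpr h
      simp only [hb, if_pos]
      rw [ih]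
      simp [add_assoc]
    · have hb : (w.getD j 0 == 1) = false := beq_eq_false_iff_ne.mpr h
      simp only [hb, Bool.not_false, Bool.false_eq_true, if_true, if_false]
      rw [ih]
      simp [add_assoc]

theorem fB_step (c : List (List Int)) (w : List Int) (k : Nat) :
    fB c w k = w.set k (if sumF c w k ≥ sumT c w k then 1 else 0) := by
  unfold fB
  simp only [Int.ofNat_eq_natCast, PySem.List.pyGetD_natCast, PySem.List.pySetD_natCast]
  rw [innerFold]
  simp only [zero_add]
  rfl

def fA (c : List (List Int)) (st : List Int × List Int × List Int) (i : Nat) :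
    List Int × List Int × List Int :=
  let S_cutgain := getCutsum (Int.ofNat i) st.2.2 c
  let T_cutgain := getCutsum (Int.ofNat i) st.2.1 c
  if S_cutgain ≥ T_cutgain then
    (PySem.List.pySetD st.1 (Int.ofNat i) 1, st.2.1 ++ [Int.ofNat i], st.2.2)
  else
    (PySem.List.pySetD st.1 (Int.ofNat i) 0, st.2.1, st.2.2 ++ [Int.ofNat i])

theorem getCutsum_map (i : Nat) (ls : List Nat) (c : List (List Int)) :
    getCutsum (Int.ofNat i) (ls.map Int.ofNat) c
      = (ls.map (fun j => (c.getD i []).getD j 0)).sum := by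
  unfold getCutsum
  rw [List.foldl_map, PySem.List.foldl_add]
  simp [Int.ofNat_eq_natCast, pysem]

theorem fA_step (c : List (List Int)) (st : List Int × List Int × List Int)
    (w : List Int) (k : Nat) (h1 : st.1 = w)
    (hS : st.2.1 = ((List.range k).filter fun j => w.getD j 0 == 1).map Int.ofNat)
    (hT : st.2.2 = ((List.range k).filter fun j => !(w.getD j 0 == 1)).map Int.ofNat) :
    fA c st k = (w.set k (if sumF c w k ≥ sumT c w k then 1 else 0),
      st.2.1 ++ (if sumF c w k ≥ sumT c w k then [Int.ofNat k] else []),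
      st.2.2 ++ (if sumF c w k ≥ sumT c w k then [] else [Int.ofNat k])) := by
  unfold fA
  rw [hT, hS, getCutsum_map, getCutsum_map]
  have hF : (((List.range k).filter (fun j => !(w.getD j 0 == 1))).map (fun j => (c.getD k []).getD j 0)).sum = sumF c w k := rfl
  have hTT : (((List.range k).filter (fun j => w.getD j 0 == 1)).map (fun j => (c.getD k []).getD j 0)).sum = sumT c w k := rfl
  rw [hF, hTT]
  by_cases hc : sumF c w k ≥ sumT c w k
  · rw [if_pos hc, if_pos hc, if_pos hc, if_pos hc]
    simp [h1, Int.ofNat_eq_natCast]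
  · rw [if_neg hc, if_neg hc, if_neg hc, if_neg hc]
    simp [h1, Int.ofNat_eq_natCast]

theorem loop_inv (c : List (List Int)) (v : List Int) (k : Nat) (hk : k ≤ v.length) :
    ((List.range k).foldl (fA c) (v, [], [])).1 = (List.range k).foldl (fB c) v ∧
    ((List.range k).foldl (fB c) v).length = v.length ∧
    (∀ j, j < k → ((List.range k).foldl (fB c) v).getD j 0 = 1 ∨
                  ((List.range k).foldl (fB c) v).getD j 0 = 0) ∧
    ((List.range k).foldl (fA c) (v, [], [])).2.1
      = ((List.range k).filter fun j => ((List.range k).foldl (fB c) v).getD j 0 == 1).map Int.ofNat ∧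
    ((List.range k).foldl (fA c) (v, [], [])).2.2
      = ((List.range k).filter fun j => !(((List.range k).foldl (fB c) v).getD j 0 == 1)).map Int.ofNat := by
  induction k with
  | zero => simp
  | succ k ih =>
    obtain ⟨h1, h2, h3, hS, hT⟩ := ih (Nat.le_of_succ_le hk)
    rw [List.range_succ]
    simp only [List.foldl_append, List.foldl_cons, List.foldl_nil, List.filter_append]
    set wB := (List.range k).foldl (fB c) v with hwB
    set stA := (List.range k).foldl (fA c) (v, [], []) with hstA
    have hklen : k < wB.length := by rw [h2]; omega
    set x : Int := if sumF c wB k ≥ sumT c wB k then 1 else 0 with hx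
    have hBstep : fB c wB k = wB.set k x := fB_step c wB k
    have hAstep := fA_step c stA wB k h1 hS hT
    rw [hAstep, hBstep]
    have hpre : ∀ j, j < k → (wB.set k x).getD j 0 = wB.getD j 0 := by
      intro j hj
      simp [List.getD, List.getElem?_set_ne (by omega : k ≠ j)]
    have hatk : (wB.set k x).getD k 0 = x := by
      simp [List.getD, List.getElem?_set_self hklen]
    have hfilt : ∀ (p : Int → Bool),
        ((List.range k).filter fun j => p ((wB.set k x).getD j 0))
          = ((List.range k).filter fun j => p (wB.getD j 0)) := by
      intro p
      refine List.filter_congr ?_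
      intro j hj
      rw [hpre j (List.mem_range.mp hj)]
    have hset : ∀ y : Int, (wB.set k y)[k]?.getD 0 = y := fun y => by
      simp [List.getElem?_set_self hklen]
    refine ⟨rfl, by simp [h2], ?_, ?_, ?_⟩
    · intro j hj
      rcases Nat.lt_succ_iff_lt_or_eq.mp hj with hj' | hj'
      · rw [hpre j hj']; exact h3 j hj'
      · rw [hj', hatk, hx]
        split_ifs <;> simp
    · rw [hS, hfilt (fun y => y == 1)]
      by_cases hc : sumF c wB k ≥ sumT c wB k
      · simp [hc, List.filter, hset, hx]
      · simp [hc, List.filter, hset, hx]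
    · rw [hT, hfilt (fun y => !(y == 1))]
      by_cases hc : sumF c wB k ≥ sumT c wB k
      · simp [hc, List.filter, hset, hx]
      · simp [hc, List.filter, hset, hx]

-- ---------- scatter (B) = gather fold ----------

-- the gather fold after k steps
def W (c : List (List Int)) (v : List Int) (k : Nat) : List Int :=
  (List.range k).foldl (fB c) v

-- the sign pushed forward by vertex j (+1 if j goes to the T side, -1 if to the S side)
def sg (c : List (List Int)) (v : List Int) (j : Nat) : Int :=
  if sumF c (W c v j) j ≥ sumT c (W c v j) j then -1 else 1

-- value of the difference array at cell m after k scatter steps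
def delta (c : List (List Int)) (v : List Int) (k m : Nat) : Int :=
  ((List.range (min m k)).map (fun j => sg c v j * (c.getD m []).getD j 0)).sum

-- the whole difference array after k scatter steps
def Dk (c : List (List Int)) (v : List Int) (n k : Nat) : List Int :=
  (List.range n).map (fun m => delta c v k m)

-- B's loop body, named (definitionally the lambda in donyokuhou_alt)
def fS (c : List (List Int)) (n : Nat) (st : List Int × List Int) (i : Nat) :
    List Int × List Int :=
  let vi : Int := if PySem.List.pyGetD st.2 (Int.ofNat i) 0 ≥ 0 then 1 else 0
  let v' := PySem.List.pySetD st.1 (Int.ofNat i) vi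
  let w : Int := if vi == 1 then -1 else 1
  let d' := (List.range' (i + 1) (n - (i + 1))).foldl
    (fun d k => PySem.List.pySetD d (Int.ofNat k)
      (PySem.List.pyGetD d (Int.ofNat k) 0
        + w * PySem.List.pyGetD (PySem.List.pyGetD c (Int.ofNat k) []) (Int.ofNat i) 0))
    st.2
  (v', d')

theorem length_W (c : List (List Int)) (v : List Int) (k : Nat) (hk : k ≤ v.length) :
    (W c v k).length = v.length := (loop_inv c v k hk).2.1

theorem W_succ (c : List (List Int)) (v : List Int) (k : Nat) :
    W c v (k + 1) = (W c v k).set k (if sumF c (W c v k) k ≥ sumT c (W c v k) k then 1 else 0) := by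
  unfold W
  rw [List.range_succ, List.foldl_append, List.foldl_cons, List.foldl_nil, fB_step]

-- decided values are stable: for j < k the gather fold holds vertex j's decision
theorem W_getD (c : List (List Int)) (v : List Int) (j k : Nat)
    (hjk : j < k) (hk : k ≤ v.length) :
    (W c v k).getD j 0 = (if sumF c (W c v j) j ≥ sumT c (W c v j) j then 1 else 0) := by
  induction k with
  | zero => omega
  | succ k ih =>
    rw [W_succ]
    rcases Nat.lt_succ_iff_lt_or_eq.mp hjk with hj' | hj'
    · have hlen : k < (W c v k).length := by
        rw [length_W c v k (by omega)]; omega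
      rw [List.getD, List.getElem?_set_ne (by omega : k ≠ j)]
      exact ih hj' (by omega)
    · subst hj'
      have hlen : j < (W c v j).length := by
        rw [length_W c v j (by omega)]; omega
      simp [List.getD, List.getElem?_set_self hlen]

-- signed sum over a list of indices splits into the two filtered sums
theorem signed_sum (w row : List Int) (l : List Nat) :
    (l.map (fun j => (if w.getD j 0 == 1 then (-1 : Int) else 1) * row.getD j 0)).sum
      = ((l.filter (fun j => !(w.getD j 0 == 1))).map (fun j => row.getD j 0)).sum
        - ((l.filter (fun j => w.getD j 0 == 1)).map (fun j => row.getD j 0)).sum := by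
  induction l with
  | nil => simp
  | cons j t ih =>
    simp only [List.map_cons, List.sum_cons, List.filter_cons]
    by_cases h : w.getD j 0 = 1
    · have hb : (w.getD j 0 == 1) = true := beq_iff_eq.mpr h
      simp only [hb, Bool.not_true, Bool.false_eq_true, if_false, if_true,
        List.map_cons, List.sum_cons]
      rw [ih]; ring
    · have hb : (w.getD j 0 == 1) = false := beq_eq_false_iff_ne.mpr h
      simp only [hb, Bool.not_false, Bool.false_eq_true, if_false, if_true,
        List.map_cons, List.sum_cons]
      rw [ih]; ring

-- the diagonal cell of the difference array is exactly the gather gain difference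
theorem delta_diag (c : List (List Int)) (v : List Int) (k : Nat) (hk : k ≤ v.length) :
    delta c v k k = sumF c (W c v k) k - sumT c (W c v k) k := by
  unfold delta
  rw [Nat.min_self]
  have hcong : ∀ j ∈ List.range k, sg c v j * (c.getD k []).getD j 0
      = (if (W c v k).getD j 0 == 1 then (-1 : Int) else 1) * (c.getD k []).getD j 0 := by
    intro j hj
    have hj' := List.mem_range.mp hj
    rw [W_getD c v j k hj' hk]
    unfold sg
    by_cases hc : sumF c (W c v j) j ≥ sumT c (W c v j) j
    · simp [hc]
    · simp [hc]
  rw [List.map_congr_left hcong, signed_sum]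
  rfl

-- generic update fold: add g k at each index k of range' a l (all in range)
theorem updFold (g : Nat → Int) (a l : Nat) (d : List Int) (h : a + l ≤ d.length) :
    ((List.range' a l).foldl
        (fun d k => d.set k (d.getD k 0 + g k)) d).length = d.length ∧
    ∀ m, ((List.range' a l).foldl
        (fun d k => d.set k (d.getD k 0 + g k)) d).getD m 0
      = d.getD m 0 + (if a ≤ m ∧ m < a + l then g m else 0) := by
  induction l generalizing a d with
  | zero =>
    refine ⟨rfl, ?_⟩
    intro m
    simp
  | succ l ih =>
    rw [List.range'_succ]
    simp only [List.foldl_cons]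
    have ha : a < d.length := by omega
    have hlen : (d.set a (d.getD a 0 + g a)).length = d.length := by simp
    obtain ⟨ih1, ih2⟩ := ih (a + 1) (d.set a (d.getD a 0 + g a)) (by omega)
    refine ⟨by rw [ih1, hlen], ?_⟩
    intro m
    rw [ih2 m]
    by_cases hma : m = a
    · subst hma
      have h1 : (d.set m (d.getD m 0 + g m)).getD m 0 = d.getD m 0 + g m := by
        simp [List.getD, List.getElem?_set_self ha]
      rw [h1]
      have c2 : m ≤ m ∧ m < m + (l + 1) := by omega
      simp [c2]
    · have h1 : (d.set a (d.getD a 0 + g a)).getD m 0 = d.getD m 0 := by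
        simp [List.getD, List.getElem?_set_ne (by omega : a ≠ m)]
      rw [h1]
      have hiff : (a + 1 ≤ m ∧ m < a + 1 + l) ↔ (a ≤ m ∧ m < a + (l + 1)) := by omega
      rw [if_congr hiff rfl rfl]

theorem scatter_D_step (c : List (List Int)) (v : List Int) (k : Nat)
    (hkn : k < v.length) (s : Int) (hs : s = sg c v k) :
    (List.range' (k + 1) (v.length - (k + 1))).foldl
      (fun d k' => d.set k' (d.getD k' 0 + s * (c.getD k' []).getD k 0))
      (Dk c v v.length k) = Dk c v v.length (k + 1) := by
  subst hs
  have hDlen : (Dk c v v.length k).length = v.length := by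
    unfold Dk; simp
  obtain ⟨hl, hg⟩ := updFold (fun k' => sg c v k * (c.getD k' []).getD k 0)
    (k + 1) (v.length - (k + 1)) (Dk c v v.length k) (by omega)
  apply List.ext_getElem
  · rw [hl, hDlen]; unfold Dk; simp
  · intro m hm1 hm2
    have hmn : m < v.length := by rw [hl, hDlen] at hm1; exact hm1
    rw [← List.getD_eq_getElem _ 0 hm1, ← List.getD_eq_getElem _ 0 hm2, hg m]
    have hDm : ∀ t, (Dk c v v.length t).getD m 0 = delta c v t m := by
      intro t
      unfold Dk
      simp [List.getD, hmn]
    rw [hDm, hDm]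
    unfold delta
    by_cases hmk : m ≤ k
    · have e1 : min m k = m := by omega
      have e2 : min m (k + 1) = m := by omega
      have c1 : ¬ (k + 1 ≤ m ∧ m < k + 1 + (v.length - (k + 1))) := by omega
      rw [e1, e2, if_neg c1, add_zero]
    · have e1 : min m k = k := by omega
      have e2 : min m (k + 1) = k + 1 := by omega
      have c1 : k + 1 ≤ m ∧ m < k + 1 + (v.length - (k + 1)) := by omega
      rw [e1, e2, List.range_succ, if_pos c1]
      simp

theorem scatter_inv (c : List (List Int)) (v : List Int) (k : Nat) (hk : k ≤ v.length) :
    (List.range k).foldl (fS c v.length) (v, List.replicate v.length 0)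
      = (W c v k, Dk c v v.length k) := by
  induction k with
  | zero =>
    refine Prod.ext rfl ?_
    show List.replicate v.length 0 = Dk c v v.length 0
    unfold Dk delta
    simp
  | succ k ih =>
    have hkn : k < v.length := by omega
    rw [List.range_succ, List.foldl_append, List.foldl_cons, List.foldl_nil,
      ih (by omega)]
    unfold fS
    simp only [Int.ofNat_eq_natCast, PySem.List.pyGetD_natCast, PySem.List.pySetD_natCast]
    have hDget : (Dk c v v.length k).getD k 0 = delta c v k k := by
      unfold Dk
      simp [List.getD, hkn]
    rw [hDget, delta_diag c v k (le_of_lt hkn)]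
    by_cases hP : sumF c (W c v k) k ≥ sumT c (W c v k) k
    · have h0 : sumF c (W c v k) k - sumT c (W c v k) k ≥ 0 := by omega
      simp only [if_pos h0, show ((1 : Int) == 1) = true by decide, if_true]
      refine Prod.ext ?_ ?_
      · show (W c v k).set k 1 = W c v (k + 1)
        rw [W_succ, if_pos hP]
      · exact scatter_D_step c v k hkn (-1) (by unfold sg; rw [if_pos hP])
    · have h0 : ¬ sumF c (W c v k) k - sumT c (W c v k) k ≥ 0 := by omega
      simp only [if_neg h0, show ((0 : Int) == 1) = false by decide,
        Bool.false_eq_true, if_false]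
      refine Prod.ext ?_ ?_
      · show (W c v k).set k 0 = W c v (k + 1)
        rw [W_succ, if_neg hP]
      · exact scatter_D_step c v k hkn 1 (by unfold sg; rw [if_neg hP])

-- ===== VERDICT (by name: the statement is the Claim_ definition above) =====
theorem donyokuhou_spec : Claim_equal_donyokuhou := by
  intro v c _ _
  unfold Spec_donyokuhou
  have h1 : donyokuhou v c = W c v v.length := (loop_inv c v v.length le_rfl).1
  have h2 : donyokuhou_alt v c = W c v v.length := by
    show ((List.range v.length).foldl (fS c v.length) (v, List.replicate v.length 0)).1 = _
    rw [scatter_inv c v v.length le_rfl]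
  rw [h1, h2]
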